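-- pv_equiv track=rewrite | github.com/lseman/logician | src/tools/registry/introspection.py | _fast_tokens
-- ===== SOURCE A (Python) =====
-- def _fast_tokens(text: str) -> set[str]:
--     out: set[str] = set()
--     buf: list[str] = []
--     for ch in str(text or "").lower():
--         if ch.isalnum() or ch == "_":
--             buf.append(ch)
--             continue
--         if len(buf) >= 2:
--             out.add("".join(buf))
--         buf.clear()
--     if len(buf) >= 2:
--         out.add("".join(buf))
--     return out
-- ===== SOURCE B (Python) =====
-- def _fast_tokens(text: str) -> set[str]:
--     s = str(text or "").lower()
--     n = len(s)
--     tokens = []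
--     i = 0
--     while i < n:
--         if s[i].isalnum() or s[i] == "_":
--             j = i + 1
--             while j < n and (s[j].isalnum() or s[j] == "_"):
--                 j += 1
--             if j - i >= 2:
--                 tokens.append(s[i:j])
--             i = j
--         else:
--             i += 1
--     return set(tokens)
-- ===== Notes on version B (the rewrite author's own statement) =====
-- stated objective: alternative
-- what changed: A accumulates characters into a mutable buffer and adds tokens to the set incrementally inside one char-by-char loop; B is a two-pointer run scanner that slices out each maximal word-character run, collects the long-enough ones in a list, and builds the set once at the end.
import Mathlib
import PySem

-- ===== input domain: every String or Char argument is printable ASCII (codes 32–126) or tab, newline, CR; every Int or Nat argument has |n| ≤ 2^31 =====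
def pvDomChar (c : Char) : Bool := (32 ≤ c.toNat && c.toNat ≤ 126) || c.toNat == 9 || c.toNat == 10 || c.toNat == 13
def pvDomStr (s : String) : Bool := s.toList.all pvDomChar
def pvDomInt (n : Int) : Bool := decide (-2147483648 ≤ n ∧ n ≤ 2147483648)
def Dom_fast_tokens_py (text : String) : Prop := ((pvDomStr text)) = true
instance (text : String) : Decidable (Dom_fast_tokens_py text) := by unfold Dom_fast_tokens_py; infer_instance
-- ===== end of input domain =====

-- B replaces A's char-by-char buffer accumulation with a two-pointer maximal-run scan that builds the set once at the end (alternative decomposition, same O(n) cost).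

-- ===== PORT A =====
-- word character test: ch.isalnum() or ch == "_"
def pvWordA (ch : Char) : Bool := PySem.Chars.isalnum ch || ch == '_'

def fast_tokens_py (text : String) : List String :=
  let s : List Char := PySem.Chars.lower (if text = "" then "" else text).toList
  let st : PySem.Set String × List Char :=
    s.foldl (fun (st : PySem.Set String × List Char) ch =>
      if pvWordA ch then (st.1, st.2 ++ [ch])
      else if st.2.length ≥ 2 then (PySem.Set.add st.1 (String.ofList st.2), ([] : List Char))
      else (st.1, ([] : List Char))) (PySem.Set.empty, [])
  if st.2.length ≥ 2 then PySem.Set.add st.1 (String.ofList st.2) else st.1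

-- ===== PORT B =====
-- Source B's outer while-loop: at a word char, the inner while advances j to the end of the
-- maximal run (takeWhile/dropWhile of the remainder), keeps the slice if its length ≥ 2,
-- and resumes at j; at a non-word char it advances by one.
def pvScanB : List Char → List String
  | [] => []
  | c :: cs =>
    if pvWordA c then
      (if (List.takeWhile pvWordA cs).length + 1 ≥ 2
        then [String.ofList (c :: List.takeWhile pvWordA cs)] else [])
      ++ pvScanB (List.dropWhile pvWordA cs)
    else pvScanB cs
  termination_by s => s.length
  decreasing_by
  · exact Nat.lt_succ_of_le (List.length_dropWhile_le _ _)
  · exact Nat.lt_succ_self _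

def fast_tokens_py_alt (text : String) : List String :=
  PySem.Set.ofList (pvScanB (PySem.Chars.lower (if text = "" then "" else text).toList))

-- ===== PRECONDITION & SPEC =====
def Spec_fast_tokens_py (text : String) (out : List String) : Prop := out = fast_tokens_py_alt text
instance (text : String) (out : List String) : Decidable (Spec_fast_tokens_py text out) := by unfold Spec_fast_tokens_py; infer_instance

-- ===== CLAIM (what is proved, stated in full; the proofs are below) =====
def Claim_equal_fast_tokens_py : Prop := ∀ (text : String), Dom_fast_tokens_py text → Spec_fast_tokens_py text (fast_tokens_py text)

-- ===== LEMMAS AND PROOFS =====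

-- emit a pending buffer: the token it contributes (if long enough)
def pvEmit (buf : List Char) : List String :=
  if buf.length ≥ 2 then [String.ofList buf] else []

-- A's loop, restated as a token list produced from a pending buffer
def pvTok (buf : List Char) : List Char → List String
  | [] => pvEmit buf
  | c :: cs => if pvWordA c then pvTok (buf ++ [c]) cs else pvEmit buf ++ pvTok [] cs

lemma pvScanB_eq_emit (s : List Char) :
    pvScanB s = pvEmit (List.takeWhile pvWordA s) ++ pvScanB (List.dropWhile pvWordA s) := by
  cases s with
  | nil => simp [pvScanB, pvEmit]
  | cons c cs =>
    by_cases h : pvWordA c = true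
    · rw [pvScanB, if_pos h, List.takeWhile_cons_of_pos h, List.dropWhile_cons_of_pos h]
      simp [pvEmit]
    · simp [List.takeWhile_cons_of_neg h, List.dropWhile_cons_of_neg h, pvEmit]

lemma pvTok_eq (s : List Char) : ∀ buf,
    pvTok buf s = pvEmit (buf ++ List.takeWhile pvWordA s) ++ pvScanB (List.dropWhile pvWordA s) := by
  induction s with
  | nil => intro buf; simp [pvTok, pvScanB]
  | cons c cs ih =>
    intro buf
    by_cases h : pvWordA c = true
    · rw [pvTok, if_pos h, ih (buf ++ [c]), List.takeWhile_cons_of_pos h,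
        List.dropWhile_cons_of_pos h]
      simp
    · rw [pvTok, if_neg h, ih [], List.takeWhile_cons_of_neg h, List.dropWhile_cons_of_neg h]
      rw [List.nil_append, List.append_nil, ← pvScanB_eq_emit cs]
      conv_rhs => rw [pvScanB]
      rw [if_neg h]

lemma pvTok_nil_eq_scan (s : List Char) : pvTok [] s = pvScanB s := by
  rw [pvTok_eq s [], List.nil_append, ← pvScanB_eq_emit]

lemma pvEmit_foldl (buf : List Char) (out : PySem.Set String) :
    (pvEmit buf).foldl PySem.Set.add out
      = if buf.length ≥ 2 then PySem.Set.add out (String.ofList buf) else out := by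
  by_cases h : buf.length ≥ 2 <;> simp [pvEmit, h]

lemma A_loop (s : List Char) : ∀ (out : PySem.Set String) (buf : List Char),
    (if (s.foldl (fun (st : PySem.Set String × List Char) ch =>
        if pvWordA ch then (st.1, st.2 ++ [ch])
        else if st.2.length ≥ 2 then (PySem.Set.add st.1 (String.ofList st.2), ([] : List Char))
        else (st.1, ([] : List Char))) (out, buf)).2.length ≥ 2
      then PySem.Set.add (s.foldl (fun (st : PySem.Set String × List Char) ch =>
        if pvWordA ch then (st.1, st.2 ++ [ch])
        else if st.2.length ≥ 2 then (PySem.Set.add st.1 (String.ofList st.2), ([] : List Char))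
        else (st.1, ([] : List Char))) (out, buf)).1
        (String.ofList (s.foldl (fun (st : PySem.Set String × List Char) ch =>
        if pvWordA ch then (st.1, st.2 ++ [ch])
        else if st.2.length ≥ 2 then (PySem.Set.add st.1 (String.ofList st.2), ([] : List Char))
        else (st.1, ([] : List Char))) (out, buf)).2)
      else (s.foldl (fun (st : PySem.Set String × List Char) ch =>
        if pvWordA ch then (st.1, st.2 ++ [ch])
        else if st.2.length ≥ 2 then (PySem.Set.add st.1 (String.ofList st.2), ([] : List Char))
        else (st.1, ([] : List Char))) (out, buf)).1)
    = (pvTok buf s).foldl PySem.Set.add out := by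
  induction s with
  | nil => intro out buf; rw [pvTok, pvEmit_foldl]; rfl
  | cons c cs ih =>
    intro out buf
    by_cases h : pvWordA c = true
    · rw [List.foldl_cons]
      simp only [h, if_true]
      rw [ih out (buf ++ [c]), pvTok, if_pos h]
    · rw [List.foldl_cons]
      simp only [h]
      rw [pvTok, if_neg h, List.foldl_append, pvEmit_foldl]
      by_cases h2 : buf.length ≥ 2
      · simp only [h2, if_true]; exact ih _ []
      · simp only [h2, if_false]; exact ih _ []

-- ===== VERDICT (by name: the statement is the Claim_ definition above) =====
theorem fast_tokens_py_spec : Claim_equal_fast_tokens_py := by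
  intro text _
  show fast_tokens_py text = fast_tokens_py_alt text
  unfold fast_tokens_py fast_tokens_py_alt
  rw [A_loop _ PySem.Set.empty [], pvTok_nil_eq_scan, PySem.Set.ofList_eq_foldl]
  rfl
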